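-- pv_equiv track=rewrite | github.com/therealkevinmunoz/CMPR114 | Week7/Homework/project1.py | consonant_count
-- ===== SOURCE A (Python) =====
-- def consonant_count(sentence):
--     consonant_count = 0
--     isVowel = False
--     lowercase_sentence = sentence.lower()
--     for ch in lowercase_sentence:
--         if ch.isalpha():
--             if ch == 'a' or ch == 'e' or ch == 'i' or ch == 'o' or ch == 'u':
--                 isVowel = True
--             else:
--                 consonant_count += 1
--
--     return consonant_count
-- ===== SOURCE B (Python) =====
-- def consonant_count(sentence):
--     s = sentence.lower()
--     letters = sum(ch.isalpha() for ch in s)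
--     vowels = sum(ch in 'aeiou' for ch in s)
--     return letters - vowels
-- ===== Notes on version B (the rewrite author's own statement) =====
-- stated objective: alternative
-- what changed: B counts consonants by complement: total alphabetic characters minus vowel occurrences (two aggregate counts), instead of A's per-character consonant test with a running counter and a vestigial isVowel flag.
import Mathlib
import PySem

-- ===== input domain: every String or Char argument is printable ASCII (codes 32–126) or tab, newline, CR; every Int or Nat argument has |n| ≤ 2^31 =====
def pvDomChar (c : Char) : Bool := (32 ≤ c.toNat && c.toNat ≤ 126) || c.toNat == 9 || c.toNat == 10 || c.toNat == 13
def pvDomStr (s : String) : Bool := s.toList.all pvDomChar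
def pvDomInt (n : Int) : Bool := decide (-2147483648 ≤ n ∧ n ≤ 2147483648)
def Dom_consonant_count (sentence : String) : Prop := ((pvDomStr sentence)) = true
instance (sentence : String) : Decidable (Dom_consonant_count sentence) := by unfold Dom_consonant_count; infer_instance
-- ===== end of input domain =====

-- B counts consonants by complement (alphabetic count minus vowel count) instead of A's per-character consonant test; alternative decomposition, same cost.

-- ===== PORT A =====
-- one loop iteration of A: state is (consonant_count, isVowel)
def pvStepA (st : Int × Bool) (ch : Char) : Int × Bool :=
  if PySem.Chars.isalpha ch then
    if ch = 'a' ∨ ch = 'e' ∨ ch = 'i' ∨ ch = 'o' ∨ ch = 'u' then (st.1, true)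
    else (st.1 + 1, st.2)
  else st

def consonant_count (sentence : String) : Int :=
  ((PySem.Str.lower sentence).toList.foldl pvStepA (0, false)).1

-- ===== PORT B =====
def consonant_count_alt (sentence : String) : Int :=
  let s := PySem.Str.lower sentence
  let letters : Int := (s.toList.countP (fun ch => PySem.Chars.isalpha ch) : Nat)
  let vowels : Int := (s.toList.countP (fun ch => decide (ch ∈ ['a','e','i','o','u'])) : Nat)
  letters - vowels

-- ===== PRECONDITION & SPEC =====
def Spec_consonant_count (sentence : String) (out : Int) : Prop := out = consonant_count_alt sentence
instance (sentence : String) (out : Int) : Decidable (Spec_consonant_count sentence out) := by unfold Spec_consonant_count; infer_instance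

-- ===== CLAIM (what is proved, stated in full; the proofs are below) =====
def Claim_equal_consonant_count : Prop := ∀ (sentence : String), Dom_consonant_count sentence → Spec_consonant_count sentence (consonant_count sentence)

-- ===== LEMMAS AND PROOFS =====
def pvIsVowel (ch : Char) : Bool := decide (ch ∈ ['a','e','i','o','u'])

theorem pvFoldA_fst (l : List Char) (acc : Int) (b : Bool) :
    (l.foldl pvStepA (acc, b)).1
      = acc + ((l.countP (fun ch => PySem.Chars.isalpha ch) : Nat) : Int)
            - ((l.countP pvIsVowel : Nat) : Int) := by
  induction l generalizing acc b with
  | nil => simp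
  | cons c t ih =>
    by_cases hv : c = 'a' ∨ c = 'e' ∨ c = 'i' ∨ c = 'o' ∨ c = 'u'
    · have ha : PySem.Chars.isalpha c = true := by
        rcases hv with h|h|h|h|h <;> subst h <;> decide
      have hvb : pvIsVowel c = true := by
        unfold pvIsVowel; rcases hv with h|h|h|h|h <;> subst h <;> decide
      simp [List.foldl, pvStepA, ha, hv, hvb, ih]
      ring
    · have hvb : pvIsVowel c = false := by
        unfold pvIsVowel
        simp only [decide_eq_false_iff_not, List.mem_cons]
        simpa using hv
      by_cases ha : PySem.Chars.isalpha c = true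
      · simp [List.foldl, pvStepA, ha, hv, hvb, ih]
        ring
      · simp [List.foldl, pvStepA, ha, hvb, ih]

-- ===== VERDICT (by name: the statement is the Claim_ definition above) =====
theorem consonant_count_spec : Claim_equal_consonant_count := by
  intro s _
  unfold Spec_consonant_count consonant_count consonant_count_alt
  rw [pvFoldA_fst]
  simp only [zero_add]
  congr 2
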